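-- pv_equiv track=rewrite | github.com/Kerl717/Fonctions-Logiques | EXO2.py | get_all_minterms
-- ===== SOURCE A (Python) =====
-- def get_all_minterms(subsets):
-- 	all_minterms = []
-- 	for subset in subsets:
-- 		for s in subset:
-- 			if s not in all_minterms:
-- 				all_minterms.append(s)
-- 	all_minterms = sorted(all_minterms)
-- 	return all_minterms
-- ===== SOURCE B (Python) =====
-- def get_all_minterms(subsets):
-- 	flat = []
-- 	for subset in subsets:
-- 		flat += subset
-- 	flat = sorted(flat)
-- 	result = []
-- 	for x in flat:
-- 		if not result or result[-1] != x:
-- 			result.append(x)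
-- 	return result
-- ===== Notes on version B (the rewrite author's own statement) =====
-- stated objective: faster
-- what changed: Replaces the per-element linear membership scan over the growing unique list with flatten, one sort, and a single adjacent-duplicate pass.
import Mathlib
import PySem

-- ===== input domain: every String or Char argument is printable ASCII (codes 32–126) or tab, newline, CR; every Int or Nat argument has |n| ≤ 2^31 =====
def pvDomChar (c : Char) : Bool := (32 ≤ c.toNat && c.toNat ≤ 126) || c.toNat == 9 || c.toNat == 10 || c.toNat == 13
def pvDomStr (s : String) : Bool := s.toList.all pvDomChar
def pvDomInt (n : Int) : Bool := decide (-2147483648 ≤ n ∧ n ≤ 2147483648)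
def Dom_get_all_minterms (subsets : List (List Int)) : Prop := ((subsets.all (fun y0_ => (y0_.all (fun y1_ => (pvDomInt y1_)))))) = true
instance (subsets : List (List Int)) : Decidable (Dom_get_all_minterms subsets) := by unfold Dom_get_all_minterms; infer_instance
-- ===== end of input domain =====

-- B replaces A's linear membership scan per element with flatten + one sort + an
-- adjacent-duplicate pass (asymptotically faster).

-- ===== PORT A =====
-- all_minterms accumulation: append each element not yet present, then sorted()
def get_all_minterms (subsets : List (List Int)) : List Int :=
  let all_minterms : List Int :=
    subsets.foldl (fun acc subset =>
      subset.foldl (fun acc s => if s ∈ acc then acc else acc ++ [s]) acc) []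
  PySem.List.sorted all_minterms (fun x => x) false

-- ===== PORT B =====
-- flatten, sort, then keep x only when result is empty or result[-1] != x
def get_all_minterms_alt (subsets : List (List Int)) : List Int :=
  let flat : List Int := subsets.foldl (fun acc subset => acc ++ subset) []
  let srt : List Int := PySem.List.sorted flat (fun x => x) false
  srt.foldl (fun res x =>
    if res = [] ∨ PySem.List.pyGet? res (-1) ≠ some x then res ++ [x] else res) []

-- ===== PRECONDITION & SPEC =====
def Spec_get_all_minterms (subsets : List (List Int)) (out : List Int) : Prop := out = get_all_minterms_alt subsets
instance (subsets : List (List Int)) (out : List Int) : Decidable (Spec_get_all_minterms subsets out) := by unfold Spec_get_all_minterms; infer_instance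

-- ===== CLAIM (what is proved, stated in full; the proofs are below) =====
def Claim_equal_get_all_minterms : Prop := ∀ (subsets : List (List Int)), Dom_get_all_minterms subsets → Spec_get_all_minterms subsets (get_all_minterms subsets)

-- ===== LEMMAS AND PROOFS =====

-- A's inner loop: membership
theorem memA_inner (l : List Int) (acc : List Int) (x : Int) :
    x ∈ l.foldl (fun acc s => if s ∈ acc then acc else acc ++ [s]) acc ↔ x ∈ acc ∨ x ∈ l := by
  induction l generalizing acc with
  | nil => simp
  | cons y t ih =>
    simp only [List.foldl_cons]
    by_cases hy : y ∈ acc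
    · simp [hy, ih]
      constructor
      · rintro (h | h) <;> tauto
      · rintro (h | rfl | h) <;> tauto
    · simp [hy, ih, List.mem_append]
      constructor
      · rintro ((h | rfl) | h) <;> tauto
      · rintro (h | rfl | h) <;> tauto

theorem nodupA_inner (l : List Int) (acc : List Int) (h : acc.Nodup) :
    (l.foldl (fun acc s => if s ∈ acc then acc else acc ++ [s]) acc).Nodup := by
  induction l generalizing acc with
  | nil => exact h
  | cons y t ih =>
    simp only [List.foldl_cons]
    by_cases hy : y ∈ acc
    · simpa [hy] using ih acc h
    · simp only [hy]
      exact ih _ (by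
        simp [List.nodup_append, h]
        exact fun a ha heq => hy (heq ▸ ha))

theorem memA_outer (subsets : List (List Int)) (acc : List Int) (x : Int) :
    x ∈ subsets.foldl (fun acc subset =>
        subset.foldl (fun acc s => if s ∈ acc then acc else acc ++ [s]) acc) acc
      ↔ x ∈ acc ∨ ∃ l ∈ subsets, x ∈ l := by
  induction subsets generalizing acc with
  | nil => simp
  | cons l t ih =>
    simp only [List.foldl_cons, ih, memA_inner, List.mem_cons]
    constructor
    · rintro ((h | h) | ⟨m, hm, hx⟩) <;> first | tauto | exact Or.inr ⟨m, Or.inr hm, hx⟩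
    · rintro (h | ⟨m, rfl | hm, hx⟩) <;> tauto

theorem nodupA_outer (subsets : List (List Int)) (acc : List Int) (h : acc.Nodup) :
    (subsets.foldl (fun acc subset =>
        subset.foldl (fun acc s => if s ∈ acc then acc else acc ++ [s]) acc) acc).Nodup := by
  induction subsets generalizing acc with
  | nil => exact h
  | cons l t ih => exact ih _ (nodupA_inner l acc h)

-- membership of the flatten fold
theorem memB_flat (subsets : List (List Int)) (acc : List Int) (x : Int) :
    x ∈ subsets.foldl (fun acc subset => acc ++ subset) acc ↔ x ∈ acc ∨ ∃ l ∈ subsets, x ∈ l := by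
  induction subsets generalizing acc with
  | nil => simp
  | cons l t ih =>
    simp only [List.foldl_cons, ih, List.mem_append, List.mem_cons]
    constructor
    · rintro ((h | h) | ⟨m, hm, hx⟩) <;> first | tauto | exact Or.inr ⟨m, Or.inr hm, hx⟩
    · rintro (h | ⟨m, rfl | hm, hx⟩) <;> tauto

-- in a strictly increasing list every element is ≤ the last
theorem le_getLast_of_pairwise_lt (res : List Int) (m : Int)
    (hp : res.Pairwise (· < ·)) (hl : res.getLast? = some m) :
    ∀ a ∈ res, a ≤ m := by
  induction res with
  | nil => simp at hl
  | cons y t ih =>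
    cases t with
    | nil =>
      simp at hl; subst hl; simp
    | cons z u =>
      rw [List.getLast?_cons_cons] at hl
      rcases List.pairwise_cons.mp hp with ⟨hy, hp'⟩
      intro a ha
      rcases List.mem_cons.mp ha with rfl | ha'
      · have hm : m ∈ z :: u := List.mem_of_getLast? hl
        exact le_of_lt (hy m hm)
      · exact ih hp' hl a ha'

-- B's dedup pass: invariant-carrying characterisation
theorem dedup_invariant (s : List Int) (res : List Int)
    (hs : s.Pairwise (· ≤ ·)) (hr : res.Pairwise (· < ·))
    (hle : ∀ a ∈ res, ∀ y ∈ s, a ≤ y) :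
    (s.foldl (fun res x =>
        if res = [] ∨ PySem.List.pyGet? res (-1) ≠ some x then res ++ [x] else res) res).Pairwise (· < ·)
    ∧ ∀ x, x ∈ s.foldl (fun res x =>
        if res = [] ∨ PySem.List.pyGet? res (-1) ≠ some x then res ++ [x] else res) res ↔ x ∈ res ∨ x ∈ s := by
  induction s generalizing res with
  | nil => simp [hr]
  | cons y t ih =>
    rcases List.pairwise_cons.mp hs with ⟨hy, hs'⟩
    simp only [List.foldl_cons]
    by_cases hres : res = []
    · subst hres
      simp only [true_or, if_pos]
      have := ih ([] ++ [y]) hs' (by simp) (by simpa using hy)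
      refine ⟨this.1, fun x => ?_⟩
      rw [this.2 x]; simp
    · have hget : PySem.List.pyGet? res (-1) = res.getLast? := PySem.List.pyGet?_neg_one res
      by_cases heq : res.getLast? = some y
      · -- last element equals y: skip
        have hcond : ¬ (res = [] ∨ PySem.List.pyGet? res (-1) ≠ some y) := by
          simp [hres, hget, heq]
        simp only [hcond, if_neg, not_false_eq_true]
        have hyres : y ∈ res := List.mem_of_getLast? heq
        have := ih res hs' hr (fun a ha z hz => hle a ha z (List.mem_cons_of_mem y hz))
        refine ⟨this.1, fun x => ?_⟩
        rw [this.2 x]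
        constructor
        · rintro (h | h) <;> simp [h]
        · rintro (h | h)
          · exact Or.inl h
          · rcases List.mem_cons.mp h with rfl | h'
            · exact Or.inl hyres
            · exact Or.inr h'
      · -- last element differs from y: append
        obtain ⟨m, hm⟩ : ∃ m, res.getLast? = some m := by
          cases hgl : res.getLast? with
          | none => exact absurd (List.getLast?_eq_none_iff.mp hgl) hres
          | some m => exact ⟨m, rfl⟩
        have hcond : (res = [] ∨ PySem.List.pyGet? res (-1) ≠ some y) := by
          simp [hres, hget, heq]
        simp only [hcond, if_pos]
        have hmy : m ≠ y := fun h => heq (h ▸ hm)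
        have hlt : ∀ a ∈ res, a < y := by
          intro a ha
          have h1 : a ≤ y := hle a ha y (List.mem_cons_self)
          rcases lt_or_eq_of_le h1 with h | rfl
          · exact h
          · have h2 : a ≤ m := le_getLast_of_pairwise_lt res m hr hm a ha
            have h3 : m ≤ a := hle m (List.mem_of_getLast? hm) a (List.mem_cons_self)
            exact absurd (le_antisymm h3 h2) hmy
        have hp' : (res ++ [y]).Pairwise (· < ·) := by
          rw [List.pairwise_append]
          exact ⟨hr, by simp, by simpa using hlt⟩
        have hle' : ∀ a ∈ res ++ [y], ∀ z ∈ t, a ≤ z := by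
          intro a ha z hz
          rcases List.mem_append.mp ha with h | h
          · exact hle a h z (List.mem_cons_of_mem y hz)
          · simp at h; subst h; exact hy z hz
        have := ih (res ++ [y]) hs' hp' hle'
        refine ⟨this.1, fun x => ?_⟩
        rw [this.2 x]
        simp [List.mem_append, or_assoc]

-- ===== VERDICT (by name: the statement is the Claim_ definition above) =====
theorem get_all_minterms_spec : Claim_equal_get_all_minterms := by
  intro subsets _
  unfold Spec_get_all_minterms get_all_minterms get_all_minterms_alt
  set D := subsets.foldl (fun acc subset =>
    subset.foldl (fun acc s => if s ∈ acc then acc else acc ++ [s]) acc) [] with hDdef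
  set F := subsets.foldl (fun acc subset => acc ++ subset) [] with hFdef
  set S := PySem.List.sorted F (fun x => x) false with hSdef
  have hS_pair : S.Pairwise (· ≤ ·) := PySem.List.sorted_pairwise F (fun x => x)
  obtain ⟨hr_pair, hr_mem⟩ := dedup_invariant S [] hS_pair (by simp) (by simp)
  set r := S.foldl (fun res x =>
    if res = [] ∨ PySem.List.pyGet? res (-1) ≠ some x then res ++ [x] else res) [] with hrdef
  have hr_nodup : r.Nodup := hr_pair.imp ne_of_lt
  have hD_nodup : D.Nodup := nodupA_outer subsets [] (by simp)
  have hmem : ∀ x, x ∈ r ↔ x ∈ D := by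
    intro x
    rw [hr_mem x, memA_outer]
    simp only [hSdef, PySem.List.mem_sorted, List.not_mem_nil, false_or]
    rw [hFdef, memB_flat]
    simp
  have hperm : r.Perm D := by
    apply List.perm_of_nodup_nodup_toFinset_eq hr_nodup hD_nodup
    ext x
    simp [List.mem_toFinset, hmem x]
  show PySem.List.sorted D (fun x => x) false = r
  exact PySem.List.sorted_eq_of_perm_of_pairwise_lt D r (fun x => x) hperm hr_pair
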